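-- pv_equiv track=rewrite | github.com/ellenjkr/Lattes2BIB | lattes2bib/utils.py | check_for_roman_numerals
-- ===== SOURCE A (Python) =====
-- def check_for_roman_numerals(word): # Checa se a palavra é um número romano
-- 	roman = ['I', 'V', 'X', 'L', 'C', 'D', 'M']
-- 	cont = 0
--
-- 	for letter in word:
-- 		if letter.upper() in roman:
-- 			cont += 1
--
-- 	if cont == len(word): # Se todas as letras da palavra fizerem parte dos numerais romanos
-- 		return word.upper()
-- 	else:
-- 		return word
-- ===== SOURCE B (Python) =====
-- def check_for_roman_numerals(word): # Checa se a palavra é um número romano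
-- 	def go(i, acc):
-- 		# build the uppercased word recursively; bail out with None on the
-- 		# first character whose uppercase is not a roman-numeral letter
-- 		if i == len(word):
-- 			return acc
-- 		u = word[i].upper()
-- 		if u in 'IVXLCDM':
-- 			return go(i + 1, acc + u)
-- 		return None
-- 	r = go(0, '')
-- 	return word if r is None else r
-- ===== Notes on version B (the rewrite author's own statement) =====
-- stated objective: alternative
-- what changed: Replaces A's full counting pass plus count-vs-length comparison with a single early-exit recursion that uppercases the word while checking it, returning None at the first non-roman character.
import Mathlib
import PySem

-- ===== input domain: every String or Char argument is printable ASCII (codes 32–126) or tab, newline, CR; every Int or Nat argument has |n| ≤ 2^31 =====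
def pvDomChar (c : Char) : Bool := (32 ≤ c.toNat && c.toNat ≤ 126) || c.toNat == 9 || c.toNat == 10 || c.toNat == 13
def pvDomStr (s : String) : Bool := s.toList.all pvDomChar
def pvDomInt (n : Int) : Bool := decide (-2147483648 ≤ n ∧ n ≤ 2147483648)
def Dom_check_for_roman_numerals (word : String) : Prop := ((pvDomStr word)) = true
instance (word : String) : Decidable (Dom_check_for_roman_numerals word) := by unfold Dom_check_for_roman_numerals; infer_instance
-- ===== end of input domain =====

-- B replaces A's counting pass + length comparison by one early-exit recursion
-- that uppercases while checking; alternative decomposition, same behaviour.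

-- ===== PORT A =====
def check_for_roman_numerals (word : String) : String :=
  let roman : List Char := ['I', 'V', 'X', 'L', 'C', 'D', 'M']
  let cont : Int :=
    word.toList.foldl (fun cont letter =>
      if (PySem.Chars.upperChar letter) ∈ roman then cont + 1 else cont) 0
  if cont = PySem.Str.len word then PySem.Str.upper word else word

-- ===== PORT B =====
-- inner helper go: walks the word from the current position, accumulating the
-- uppercased prefix; returns none at the first non-roman uppercase character.
def cfrnGo : List Char → List Char → Option (List Char)
  | [], acc => some acc
  | c :: rest, acc =>
    let u := PySem.Chars.upperChar c
    if u ∈ "IVXLCDM".toList then cfrnGo rest (acc ++ [u]) else none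

def check_for_roman_numerals_alt (word : String) : String :=
  match cfrnGo word.toList [] with
  | none => word
  | some r => String.ofList r

-- ===== PRECONDITION & SPEC =====
def Spec_check_for_roman_numerals (word : String) (out : String) : Prop := out = check_for_roman_numerals_alt word
instance (word : String) (out : String) : Decidable (Spec_check_for_roman_numerals word out) := by unfold Spec_check_for_roman_numerals; infer_instance

-- ===== CLAIM (what is proved, stated in full; the proofs are below) =====
def Claim_equal_check_for_roman_numerals : Prop := ∀ (word : String), Dom_check_for_roman_numerals word → Spec_check_for_roman_numerals word (check_for_roman_numerals word)

-- ===== LEMMAS AND PROOFS =====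

-- Characterisation of B's recursion: it returns the accumulated uppercase map
-- when every character's uppercase is roman, and none otherwise.
lemma cfrnGo_eq (l acc : List Char) :
    cfrnGo l acc =
      if l.all (fun c => PySem.Chars.upperChar c ∈ "IVXLCDM".toList) then
        some (acc ++ l.map PySem.Chars.upperChar)
      else none := by
  induction l generalizing acc with
  | nil => simp [cfrnGo]
  | cons c rest ih =>
    simp only [cfrnGo, List.all_cons, List.map_cons]
    by_cases hc : PySem.Chars.upperChar c ∈ "IVXLCDM".toList
    · rw [if_pos hc, ih]
      simp only [hc, decide_true, Bool.true_and, List.append_assoc, List.singleton_append]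
    · rw [if_neg hc]
      simp only [hc, decide_false, Bool.false_and, if_neg (Bool.false_ne_true)]

theorem check_for_roman_numerals_spec : Claim_equal_check_for_roman_numerals := by
  intro word _
  unfold Spec_check_for_roman_numerals check_for_roman_numerals check_for_roman_numerals_alt
  dsimp only
  rw [cfrnGo_eq]
  have hlist : "IVXLCDM".toList = (['I', 'V', 'X', 'L', 'C', 'D', 'M'] : List Char) := rfl
  have hcnt := PySem.List.foldl_count_if
    (fun letter => decide (PySem.Chars.upperChar letter ∈ (['I', 'V', 'X', 'L', 'C', 'D', 'M'] : List Char)))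
    word.toList 0
  simp only [decide_eq_true_eq] at hcnt
  rw [hcnt, zero_add, PySem.Str.len_eq]
  by_cases h : word.toList.all (fun c => PySem.Chars.upperChar c ∈ "IVXLCDM".toList)
  · have hall : ∀ c ∈ word.toList,
        (fun letter => decide (PySem.Chars.upperChar letter ∈ (['I', 'V', 'X', 'L', 'C', 'D', 'M'] : List Char))) c = true := by
      simpa only [hlist] using List.all_eq_true.mp h
    rw [if_pos (by exact_mod_cast List.countP_eq_length.mpr hall), if_pos h]
    show PySem.Str.upper word = String.ofList ([] ++ word.toList.map PySem.Chars.upperChar)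
    rfl
  · rw [if_neg h]
    rw [if_neg]
    intro hEq
    apply h
    have hcount : List.countP
        (fun letter => decide (PySem.Chars.upperChar letter ∈ (['I', 'V', 'X', 'L', 'C', 'D', 'M'] : List Char)))
        word.toList = word.toList.length := by exact_mod_cast hEq
    have := List.countP_eq_length.mp hcount
    simp only [List.all_eq_true, hlist]
    intro c hcmem
    simpa using this c hcmem
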